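-- pv_equiv track=rewrite | github.com/JIM00N/algorithm_practice | recursive/star_marking10.py | three_times
-- ===== SOURCE A (Python) =====
-- def three_times(stars):
--     # 세배로 만들기 "***\n* *" ->"*********\n* ** ** *"
--     strs = ""
--     strs_long = ""
--     for i in stars:
--         if i == "\n":
--             # 줄 바꿈이 나오면 앞에서 더해준 스트링을 세배하고 줄바꿈 추가한 뒤 스트링 최기화
--             strs_long += 3 * strs + i
--             strs = ""
--         else:
--             # 줄 바꿈이 나오기 전에 빈 스트링에 더하기
--             strs += i
--     # 마지막에는 줄 바꿈이 없으니 그냥 세배해서 더하기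
--     strs_long += 3 * strs
--     return strs_long
-- ===== SOURCE B (Python) =====
-- def three_times(stars):
--     lines = stars.split("\n")
--     return "\n".join(3 * line for line in lines)
-- ===== Notes on version B (the rewrite author's own statement) =====
-- stated objective: idiomatic
-- what changed: Replaced the char-by-char state machine with a line buffer flushed on each newline by splitting the string into lines and joining the tripled lines.
import Mathlib
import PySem

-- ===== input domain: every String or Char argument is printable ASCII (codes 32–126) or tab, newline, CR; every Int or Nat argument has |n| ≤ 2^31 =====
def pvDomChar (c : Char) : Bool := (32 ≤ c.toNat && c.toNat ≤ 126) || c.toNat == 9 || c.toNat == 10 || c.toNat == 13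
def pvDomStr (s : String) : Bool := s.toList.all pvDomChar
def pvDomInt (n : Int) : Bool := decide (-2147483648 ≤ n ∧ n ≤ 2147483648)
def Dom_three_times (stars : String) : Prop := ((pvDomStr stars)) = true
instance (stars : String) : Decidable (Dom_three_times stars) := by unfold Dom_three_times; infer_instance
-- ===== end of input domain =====

-- B replaces A's char-by-char state machine (line buffer flushed on '\n') by split on '\n'
-- then join of the tripled lines (idiomatic; same return value).

-- ===== PORT A =====
def three_times (stars : String) : String :=
  let st := stars.toList.foldl
    (fun (s : List Char × List Char) i =>
      if i == '\n' then ([], s.2 ++ (s.1 ++ s.1 ++ s.1) ++ [i])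
      else (s.1 ++ [i], s.2))
    ([], [])
  String.mk (st.2 ++ (st.1 ++ st.1 ++ st.1))

-- ===== PORT B =====
def three_times_alt (stars : String) : String :=
  let lines := PySem.Chars.splitOn stars.toList ['\n']
  String.mk (PySem.Chars.join ['\n'] (lines.map (fun line => line ++ line ++ line)))

-- ===== PRECONDITION & SPEC =====
def Spec_three_times (stars : String) (out : String) : Prop := out = three_times_alt stars
instance (stars : String) (out : String) : Decidable (Spec_three_times stars out) := by unfold Spec_three_times; infer_instance

-- ===== CLAIM (what is proved, stated in full; the proofs are below) =====
def Claim_equal_three_times : Prop := ∀ (stars : String), Dom_three_times stars → Spec_three_times stars (three_times stars)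

-- ===== LEMMAS AND PROOFS =====

-- proof-only helper: simple structural recursion computing stars.split('\n') with a buffer
def mySplit (buf : List Char) : List Char → List (List Char)
  | [] => [buf]
  | c :: rest => if c = '\n' then buf :: mySplit [] rest else mySplit (buf ++ [c]) rest

-- A's loop body, named for the proofs (definitionally the lambda in the port)
def stepA (s : List Char × List Char) (i : Char) : List Char × List Char :=
  if i == '\n' then ([], s.2 ++ (s.1 ++ s.1 ++ s.1) ++ [i]) else (s.1 ++ [i], s.2)

theorem mySplit_ne_nil (buf : List Char) (l : List Char) : mySplit buf l ≠ [] := by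
  cases l with
  | nil => simp [mySplit]
  | cons c rest => by_cases h : c = '\n' <;> simp [mySplit, h] <;> exact mySplit_ne_nil _ rest

theorem go_eq_mySplit : ∀ (fuel : Nat) (l cur : List Char) (acc : List (List Char)),
    l.length < fuel →
    PySem.Chars.splitOn.go ['\n'] fuel l cur acc = acc.reverse ++ mySplit cur.reverse l := by
  intro fuel
  induction fuel with
  | zero => intro l cur acc h; omega
  | succ f ih =>
    intro l cur acc h
    cases l with
    | nil => simp [PySem.Chars.splitOn.go, mySplit]
    | cons c rest =>
      by_cases hc : c = '\n'
      · subst hc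
        rw [PySem.Chars.splitOn.go, if_pos (by simp [List.isPrefixOf])]
        have hr := ih rest [] (cur.reverse :: acc) (by simpa using Nat.lt_of_succ_lt_succ h)
        simp only [List.length_cons, List.length_nil, List.drop_succ_cons, List.drop_zero]
        rw [hr]
        simp [mySplit]
      · rw [PySem.Chars.splitOn.go, if_neg (by simp [List.isPrefixOf, Ne.symm hc])]
        rw [ih rest (c :: cur) acc (by simpa using Nat.lt_of_succ_lt_succ h)]
        simp [mySplit, hc]

theorem splitOn_eq_mySplit (s : List Char) :
    PySem.Chars.splitOn s ['\n'] = mySplit [] s := by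
  unfold PySem.Chars.splitOn
  simpa using go_eq_mySplit (s.length + 1) s [] [] (by omega)

-- A's loop, run from an arbitrary state, yields long ++ join of the tripled remaining lines
theorem runA_eq : ∀ (l buf long : List Char),
    (List.foldl stepA (buf, long) l).2 ++
      ((List.foldl stepA (buf, long) l).1 ++ (List.foldl stepA (buf, long) l).1 ++
        (List.foldl stepA (buf, long) l).1) =
    long ++ PySem.Chars.join ['\n'] ((mySplit buf l).map (fun x => x ++ x ++ x)) := by
  intro l
  induction l with
  | nil =>
    intro buf long
    simp [mySplit, PySem.Chars.join, List.intercalate]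
  | cons c rest ih =>
    intro buf long
    by_cases hc : c = '\n'
    · subst hc
      have hstep : stepA (buf, long) '\n' = ([], long ++ (buf ++ buf ++ buf) ++ ['\n']) := by
        simp [stepA]
      rw [List.foldl_cons, hstep, ih [] (long ++ (buf ++ buf ++ buf) ++ ['\n'])]
      obtain ⟨b, t, hbt⟩ : ∃ b t, mySplit [] rest = b :: t := by
        cases hms : mySplit [] rest with
        | nil => exact absurd hms (mySplit_ne_nil _ _)
        | cons b t => exact ⟨b, t, rfl⟩
      simp only [mySplit, eq_self_iff_true, if_true, hbt, List.map_cons]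
      rw [PySem.Chars.join_cons_cons]
      simp
    · have hstep : stepA (buf, long) c = (buf ++ [c], long) := by
        simp [stepA, hc]
      rw [List.foldl_cons, hstep, ih (buf ++ [c]) long]
      simp [mySplit, hc]

-- ===== VERDICT (by name: the statement is the Claim_ definition above) =====
theorem three_times_spec : Claim_equal_three_times := by
  intro stars _
  unfold Spec_three_times three_times three_times_alt
  rw [splitOn_eq_mySplit]
  show String.mk ((List.foldl stepA ([], []) stars.toList).2 ++
      ((List.foldl stepA ([], []) stars.toList).1 ++ (List.foldl stepA ([], []) stars.toList).1 ++
        (List.foldl stepA ([], []) stars.toList).1)) =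
    String.mk (PySem.Chars.join ['\n'] ((mySplit [] stars.toList).map (fun line => line ++ line ++ line)))
  rw [runA_eq stars.toList [] []]
  simp
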